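-- pv_equiv track=rewrite | github.com/ALPAGU6161616/yula_bot | yula_strategy.py | _is_valid_height
-- ===== SOURCE A (Python) =====
-- def _is_valid_height(current_price, candidates, is_long_range):
--     """
--     Checks if the current price is a valid candidate based on previous candidates.
--     For Long Range (X, L, M): We look for Highs (X2, L2, M2). New candidate must be > all previous candidates.
--     For Short Range (Y, S, N): We look for Lows (Y2, S2, N2). New candidate must be < all previous candidates.
--     """
--     if not candidates:
--         return True
--
--     for p in candidates:
--         if is_long_range: # Looking for higher highs
--             if current_price <= p:
--                 return False
--         else: # Looking for lower lows
--             if current_price >= p: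
--                 return False
--     return True
-- ===== SOURCE B (Python) =====
-- def _is_valid_height(current_price, candidates, is_long_range):
--     s = sorted(candidates)
--     if not s:
--         return True
--     if is_long_range:
--         return current_price > s[-1]
--     return current_price < s[0]
-- ===== Notes on version B (the rewrite author's own statement) =====
-- stated objective: alternative
-- what changed: Instead of scanning with a per-element branch and early exit, B sorts the candidates once and compares current_price against a single endpoint of the sorted list (last for long range, first for short range).
import Mathlib
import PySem

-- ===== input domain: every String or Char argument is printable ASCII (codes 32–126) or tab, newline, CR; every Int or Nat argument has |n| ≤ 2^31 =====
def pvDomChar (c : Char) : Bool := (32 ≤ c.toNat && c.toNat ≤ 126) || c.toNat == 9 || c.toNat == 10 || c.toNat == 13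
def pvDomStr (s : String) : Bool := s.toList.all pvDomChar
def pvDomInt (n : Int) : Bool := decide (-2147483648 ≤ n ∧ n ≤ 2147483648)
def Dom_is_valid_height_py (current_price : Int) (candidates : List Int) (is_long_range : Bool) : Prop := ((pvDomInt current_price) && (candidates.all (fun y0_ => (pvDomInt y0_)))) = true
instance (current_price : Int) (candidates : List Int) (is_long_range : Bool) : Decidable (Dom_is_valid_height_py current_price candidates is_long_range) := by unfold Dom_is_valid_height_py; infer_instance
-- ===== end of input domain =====

-- B sorts the candidates once and compares current_price with one endpoint of the sorted list (alternative decomposition; return value equivalence).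


-- ===== PORT A =====
-- A's for-loop over candidates with early return, as structural recursion
def pvLoopA (current_price : Int) (is_long_range : Bool) : List Int → Bool
  | [] => true
  | p :: rest =>
    if is_long_range then
      if current_price ≤ p then false else pvLoopA current_price is_long_range rest
    else
      if current_price ≥ p then false else pvLoopA current_price is_long_range rest

def is_valid_height_py (current_price : Int) (candidates : List Int) (is_long_range : Bool) : Bool :=
  if candidates.isEmpty then true
  else pvLoopA current_price is_long_range candidates

-- ===== PORT B =====
-- B: sort once, then compare against one endpoint of the sorted list (s[-1] / s[0])
def is_valid_height_py_alt (current_price : Int) (candidates : List Int) (is_long_range : Bool) : Bool :=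
  let s := PySem.List.sorted candidates (fun y => y) false
  if s.isEmpty then true
  else if is_long_range then
    match PySem.List.pyGet? s (-1) with   -- s[-1]; nonempty here, so never none
    | some m => decide (current_price > m)
    | none => true
  else
    match PySem.List.pyGet? s 0 with      -- s[0]; nonempty here, so never none
    | some m => decide (current_price < m)
    | none => true

-- ===== PRECONDITION & SPEC =====
def Spec_is_valid_height_py (current_price : Int) (candidates : List Int) (is_long_range : Bool) (out : Bool) : Prop := out = is_valid_height_py_alt current_price candidates is_long_range
instance (current_price : Int) (candidates : List Int) (is_long_range : Bool) (out : Bool) : Decidable (Spec_is_valid_height_py current_price candidates is_long_range out) := by unfold Spec_is_valid_height_py; infer_instance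

-- ===== CLAIM =====
def Claim_equal_is_valid_height_py : Prop := ∀ (current_price : Int) (candidates : List Int) (is_long_range : Bool), Dom_is_valid_height_py current_price candidates is_long_range → Spec_is_valid_height_py current_price candidates is_long_range (is_valid_height_py current_price candidates is_long_range)

-- ===== LEMMAS AND PROOFS =====

-- A's loop returns true iff every element is strictly on the right side
lemma pvLoopA_all (cp : Int) (lr : Bool) (l : List Int) :
    pvLoopA cp lr l = decide (∀ p ∈ l, if lr then p < cp else cp < p) := by
  induction l with
  | nil => simp [pvLoopA]
  | cons x t ih =>
    cases lr with
    | true =>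
      by_cases h : cp ≤ x
      · simp [pvLoopA, h, show ¬ x < cp by omega]
      · simp [pvLoopA, h, ih, show x < cp by omega]
    | false =>
      by_cases h : x ≤ cp
      · simp [pvLoopA, h, show ¬ cp < x by omega]
      · simp [pvLoopA, h, ih, show cp < x by omega]

-- in a (≤)-sorted list the last element bounds every member from above
lemma pairwise_le_getLast (l : List Int) (hp : l.Pairwise (· ≤ ·)) (hl : l ≠ []) :
    ∀ y ∈ l, y ≤ l.getLast hl := by
  induction l with
  | nil => simp
  | cons x t ih =>
    cases t with
    | nil => simp_all
    | cons z t' =>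
      intro y hy
      rcases List.mem_cons.mp hy with rfl | hy'
      · have hx : y ≤ z := (List.pairwise_cons.mp hp).1 z (List.mem_cons_self)
        have := ih (List.pairwise_cons.mp hp).2 (by simp) z List.mem_cons_self
        calc y ≤ z := hx
          _ ≤ _ := by simpa [List.getLast] using this
      · have := ih (List.pairwise_cons.mp hp).2 (by simp) y hy'
        simpa [List.getLast] using this

theorem is_valid_height_py_spec : Claim_equal_is_valid_height_py := by
  intro cp cs lr _
  unfold Spec_is_valid_height_py is_valid_height_py is_valid_height_py_alt
  have hperm := PySem.List.sorted_perm cs (fun y => y) false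
  have hpair := PySem.List.sorted_pairwise (xs := cs) (key := fun y => y)
  have hmem : ∀ y, y ∈ PySem.List.sorted cs (fun y => y) false ↔ y ∈ cs := fun y => hperm.mem_iff
  by_cases hnil : cs = []
  · subst hnil
    simp [PySem.List.sorted]
  · have hsne : PySem.List.sorted cs (fun y => y) false ≠ [] := by
      simpa [PySem.List.sorted_eq_nil_iff] using hnil
    have hce : cs.isEmpty = false := by simp [hnil]
    have hse : (PySem.List.sorted cs (fun y => y) false).isEmpty = false := by simp [hsne]
    simp only [hce, hse, Bool.false_eq_true, if_false, pvLoopA_all]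
    cases lr with
    | true =>
      simp only [if_true]
      rw [PySem.List.pyGet?_neg_one, List.getLast?_eq_some_getLast hsne]
      have hlast_mem : (PySem.List.sorted cs (fun y => y) false).getLast hsne ∈ cs :=
        (hmem _).mp (List.getLast_mem hsne)
      have hbound : ∀ y ∈ cs, y ≤ (PySem.List.sorted cs (fun y => y) false).getLast hsne :=
        fun y hy => pairwise_le_getLast _ hpair hsne y ((hmem y).mpr hy)
      by_cases h : (PySem.List.sorted cs (fun y => y) false).getLast hsne < cp
      · simp only [decide_eq_decide]
        constructor
        · intro _; omega
        · intro _ p hp; have := hbound p hp; omega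
      · simp only [decide_eq_decide]
        constructor
        · intro hall; exact absurd (hall _ hlast_mem) h
        · intro h'; omega
    | false =>
      simp only [Bool.false_eq_true, if_false]
      obtain ⟨m, t, hst⟩ := List.exists_cons_of_ne_nil hsne
      rw [hst, PySem.List.pyGet?_zero_cons]
      have hhead_mem : m ∈ cs := (hmem m).mp (hst ▸ List.mem_cons_self)
      have hbound : ∀ y ∈ cs, m ≤ y := fun y hy =>
        PySem.List.key_head_sorted_le (xs := cs) (key := fun y => y) hst y hy
      by_cases h : cp < m
      · simp only [decide_eq_decide]
        constructor
        · intro _; omega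
        · intro _ p hp; have := hbound p hp; omega
      · simp only [decide_eq_decide]
        constructor
        · intro hall; exact absurd (hall _ hhead_mem) h
        · intro h'; omega

-- ===== VERDICT =====
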